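-- pv_equiv track=rewrite | github.com/p-mckenzie/Advent_of_Code_2019 | day04.py | valid_2
-- ===== SOURCE A (Python) =====
-- def valid_2(num):
--     '''Checks for monotonically increasing sequence, with at least one duplicated (and no longer than 2)
--     pair of sequential numbers'''
--     num = str(num)
--     duplicated = False
--
--     counts = [0]*10
--     for i in range(0, len(num)):
--         # record what # the current character is
--         counts[int(num[i])] += 1
--
--         # find at least one duplicated sequence
--         if i>0:
--             if num[i-1]==num[i]:
--                 duplicated = True
--             # check sequence is monotonically increasing
--             if num[i-1]>num[i]:
--                 return False
--
--     # return whether sequence met requirements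
--     return (duplicated and (2 in counts))
-- ===== SOURCE B (Python) =====
-- def valid_2(num):
--     '''Monotone digit string with some run of exactly length 2: check monotonicity
--     over adjacent pairs, then run-length encode and test for a run of length 2.'''
--     s = str(num)
--     if any(a > b for a, b in zip(s, s[1:])):
--         return False
--     runs = []
--     prev = s[0]
--     k = 1
--     for c in s[1:]:
--         if c == prev:
--             k += 1
--         else:
--             runs.append(k)
--             prev = c
--             k = 1
--     runs.append(k)
--     return 2 in runs
-- ===== Notes on version B (the rewrite author's own statement) =====
-- stated objective: alternative
-- what changed: Replaces A's single indexed pass maintaining a 10-slot per-digit count array plus an adjacency flag with a monotonicity test over adjacent pairs followed by a run-length encoding, returning whether some run has length exactly 2.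
import Mathlib
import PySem

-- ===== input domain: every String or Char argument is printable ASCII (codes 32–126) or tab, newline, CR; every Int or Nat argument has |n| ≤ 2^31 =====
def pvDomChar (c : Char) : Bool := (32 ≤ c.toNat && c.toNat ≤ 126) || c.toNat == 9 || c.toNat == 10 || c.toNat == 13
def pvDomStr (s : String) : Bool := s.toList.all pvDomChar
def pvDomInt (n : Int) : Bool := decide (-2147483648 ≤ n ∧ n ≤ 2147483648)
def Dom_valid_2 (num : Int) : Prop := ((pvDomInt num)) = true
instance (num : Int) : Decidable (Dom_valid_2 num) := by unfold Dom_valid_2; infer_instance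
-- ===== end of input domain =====

-- B replaces A's single indexed pass (per-digit count array + adjacency flag) with a
-- monotonicity test over adjacent pairs followed by a run-length encoding; same cost.


-- ===== PORT A =====
-- int(num[i]) on a single character; Python raises ValueError on a non-digit
-- (excluded by Pre_valid_2, which restricts to num ≥ 0 whose str is all digits).
def pyDigitVal (c : Char) : Int := (PySem.Int.ofStr? (String.ofList [c])).getD 0

-- counts[int(num[i])] += 1
def pvBump (counts : List Int) (c : Char) : List Int :=
  let d := (pyDigitVal c).toNat
  counts.set d (counts.getD d 0 + 1)

-- the body of A's index loop, carrying num[i-1] as `prev` (the i>0 case)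
def valid2Go (prev : Char) : List Char → List Int → Bool → Bool
  | [], counts, dup => dup && decide ((2 : Int) ∈ counts)
  | c :: cs, counts, dup =>
      let counts' := pvBump counts c
      let dup' := if prev = c then true else dup
      if prev > c then false else valid2Go c cs counts' dup'

def valid_2 (num : Int) : Bool :=
  match PySem.Int.toChars num with
  | [] => false            -- unreachable: str(num) is never empty; A returns `duplicated and …` = False
  | c :: cs => valid2Go c cs (pvBump (List.replicate 10 0) c) false

-- ===== PORT B =====
-- the run-length loop of Source B: prev/k accumulator, appending k at each run break and at the end
def runGo (c : Char) (k : Int) : List Char → List Int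
  | [] => [k]
  | d :: ds => if d = c then runGo c (k + 1) ds else k :: runGo d 1 ds

def runLengths : List Char → List Int
  | [] => []
  | c :: cs => runGo c 1 cs

def valid_2_alt (num : Int) : Bool :=
  let s := PySem.Int.toChars num
  if (s.zip s.tail).any (fun p => decide (p.2 < p.1)) then false
  else decide ((2 : Int) ∈ runLengths s)

-- ===== PRECONDITION & SPEC =====
-- Pre_ excludes exactly num < 0: there str(num) starts with '-' and A raises ValueError at int('-').
def Pre_valid_2 (num : Int) : Prop := 0 ≤ num
instance (num : Int) : Decidable (Pre_valid_2 num) := by unfold Pre_valid_2; infer_instance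
def pvWitness_valid_2 : Int := 122345

def Spec_valid_2 (num : Int) (out : Bool) : Prop := out = valid_2_alt num
instance (num : Int) (out : Bool) : Decidable (Spec_valid_2 num out) := by unfold Spec_valid_2; infer_instance

-- ===== CLAIM (what is proved, stated in full; the proofs are below) =====
def Claim_equal_valid_2 : Prop := ∀ (num : Int), Dom_valid_2 num → Pre_valid_2 num → Spec_valid_2 num (valid_2 num)

-- ===== LEMMAS AND PROOFS =====

-- every character produced by Nat.toDigitsCore (base 10) is a decimal digit character
theorem toDigitsCore_digits (f : ℕ) : ∀ (n : ℕ) (acc : List Char),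
    (∀ c ∈ acc, ∃ d, d < 10 ∧ c = Nat.digitChar d) →
    ∀ c ∈ Nat.toDigitsCore 10 f n acc, ∃ d, d < 10 ∧ c = Nat.digitChar d := by
  induction f with
  | zero => intro n acc hacc; simpa [Nat.toDigitsCore] using hacc
  | succ f ih =>
    intro n acc hacc c hc
    simp only [Nat.toDigitsCore] at hc
    have hmod : n % 10 < 10 := Nat.mod_lt _ (by omega)
    by_cases h : n / 10 = 0
    · simp [h] at hc
      rcases hc with h1 | h2
      · exact ⟨n % 10, hmod, h1⟩
      · exact hacc _ h2
    · simp [h] at hc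
      refine ih (n / 10) _ ?_ c hc
      intro c' hc'
      rcases List.mem_cons.mp hc' with h1 | h2
      · exact ⟨n % 10, hmod, h1⟩
      · exact hacc _ h2

theorem toDigitsCore_append (f : ℕ) : ∀ (n : ℕ) (acc : List Char),
    ∃ l, Nat.toDigitsCore 10 f n acc = l ++ acc := by
  induction f with
  | zero => intro n acc; exact ⟨[], by simp [Nat.toDigitsCore]⟩
  | succ f ih =>
    intro n acc
    simp only [Nat.toDigitsCore]
    by_cases h : n / 10 = 0
    · exact ⟨[(n % 10).digitChar], by simp [h]⟩
    · rcases ih (n / 10) ((n % 10).digitChar :: acc) with ⟨l, hl⟩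
      exact ⟨l ++ [(n % 10).digitChar], by simp [h, hl]⟩

theorem toDigits_ne_nil (n : ℕ) : Nat.toDigits 10 n ≠ [] := by
  show Nat.toDigitsCore 10 (n + 1) n [] ≠ []
  simp only [Nat.toDigitsCore]
  by_cases h : n / 10 = 0
  · simp [h]
  · rcases toDigitsCore_append n ((n / 10)) ((n % 10).digitChar :: []) with ⟨l, hl⟩
    simp [h, hl]

theorem pyDigitVal_digitChar (d : ℕ) (hd : d < 10) : pyDigitVal (Nat.digitChar d) = d := by
  interval_cases d <;> decide

-- A's count array: length is preserved and the j-th slot counts the digit j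
theorem foldl_bump_length : ∀ (s : List Char) (counts : List Int),
    (List.foldl pvBump counts s).length = counts.length := by
  intro s
  induction s with
  | nil => intro counts; rfl
  | cons c cs ih => intro counts; simp [List.foldl_cons, ih, pvBump]

theorem foldl_bump_getD : ∀ (s : List Char),
    (∀ c ∈ s, ∃ d, d < 10 ∧ c = Nat.digitChar d) →
    ∀ (counts : List Int), counts.length = 10 →
    ∀ j, j < 10 →
    (List.foldl pvBump counts s).getD j 0 = counts.getD j 0 + (s.count (Nat.digitChar j) : Int) := by
  intro s
  induction s with
  | nil => intro _ counts _ j _; simp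
  | cons c cs ih =>
    intro hdig counts hlen j hj
    rcases hdig c List.mem_cons_self with ⟨d, hd, rfl⟩
    have hb : (pvBump counts (Nat.digitChar d)).length = 10 := by
      simp [pvBump, hlen]
    have := ih (fun c hc => hdig c (List.mem_cons_of_mem _ hc)) (pvBump counts (Nat.digitChar d)) hb j hj
    simp only [List.foldl_cons, this]
    have hval : (pyDigitVal (Nat.digitChar d)).toNat = d := by
      rw [pyDigitVal_digitChar d hd]; simp
    have hinj : (Nat.digitChar d = Nat.digitChar j) ↔ d = j := by
      constructor
      · intro h
        have h1 := pyDigitVal_digitChar d hd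
        have h2 := pyDigitVal_digitChar j hj
        rw [h] at h1; rw [h2] at h1; exact_mod_cast h1.symm
      · intro h; rw [h]
    by_cases hdj : d = j
    · subst hdj
      have : (pvBump counts (Nat.digitChar d)).getD d 0 = counts.getD d 0 + 1 := by
        simp [pvBump, hval, List.getD, hlen.symm ▸ hd]
      rw [this]
      simp
      ring
    · have : (pvBump counts (Nat.digitChar d)).getD j 0 = counts.getD j 0 := by
        simp [pvBump, hval, List.getD, List.getElem?_set_ne (by omega : d ≠ j)]
      rw [this]
      have : ¬ (Nat.digitChar d = Nat.digitChar j) := fun h => hdj (hinj.mp h)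
      simp [List.count_cons, this]

theorem mem_foldl_bump (s : List Char)
    (hdig : ∀ c ∈ s, ∃ d, d < 10 ∧ c = Nat.digitChar d) :
    ((2 : Int) ∈ List.foldl pvBump (List.replicate 10 0) s) ↔ ∃ e ∈ s, s.count e = 2 := by
  have hlen : (List.foldl pvBump (List.replicate 10 0) s).length = 10 := by
    simp [foldl_bump_length]
  constructor
  · intro hmem
    rcases List.mem_iff_getElem.mp hmem with ⟨j, hjlt, hj⟩
    have hjlt' : j < 10 := by omega
    have h1 := foldl_bump_getD s hdig (List.replicate 10 0) (by simp) j hjlt'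
    rw [List.getD_eq_getElem _ _ hjlt, hj] at h1
    have h0 : (List.replicate 10 (0:Int)).getD j 0 = 0 := by
      rw [List.getD_eq_getElem _ _ (by simp only [List.length_replicate]; omega), List.getElem_replicate]
    rw [h0] at h1
    have hc : s.count (Nat.digitChar j) = 2 := by omega
    exact ⟨Nat.digitChar j, List.count_pos_iff.mp (by omega), hc⟩
  · rintro ⟨e, he, hce⟩
    rcases hdig e he with ⟨d, hd, rfl⟩
    have h1 := foldl_bump_getD s hdig (List.replicate 10 0) (by simp) d hd
    have h0 : (List.replicate 10 (0:Int)).getD d 0 = 0 := by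
      rw [List.getD_eq_getElem _ _ (by simp only [List.length_replicate]; omega), List.getElem_replicate]
    rw [h0, hce] at h1
    have hd' : d < (List.foldl pvBump (List.replicate 10 0) s).length := by omega
    rw [List.getD_eq_getElem _ _ hd'] at h1
    have : (List.foldl pvBump (List.replicate 10 0) s)[d] = 2 := by rw [h1]; norm_num
    rw [← this]
    exact List.getElem_mem _

-- B's runs: membership characterisation on sorted lists
theorem not_mem_of_pairwise {c d : Char} {ds : List Char}
    (hp : (c :: d :: ds).Pairwise (· ≤ ·)) (hne : d ≠ c) : c ∉ d :: ds := by
  intro hmem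
  rcases List.mem_cons.mp hmem with h | h
  · exact hne h.symm
  · have h1 : c ≤ d := (List.pairwise_cons.mp hp).1 d List.mem_cons_self
    have h2 : d ≤ c := (List.pairwise_cons.mp (List.pairwise_cons.mp hp).2).1 c h
    exact hne (le_antisymm h2 h1)

theorem runGo_mem : ∀ (xs : List Char) (c : Char) (k m : Int),
    (c :: xs).Pairwise (· ≤ ·) →
    (m ∈ runGo c k xs ↔ m = k + (xs.count c : Int) ∨ ∃ d ∈ xs, d ≠ c ∧ m = (xs.count d : Int)) := by
  intro xs
  induction xs with
  | nil => intro c k m _; simp [runGo]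
  | cons d ds ih =>
    intro c k m hp
    by_cases hdc : d = c
    · subst hdc
      have hp' : (d :: ds).Pairwise (· ≤ ·) := hp.sublist (by simp)
      rw [show runGo d k (d :: ds) = runGo d (k+1) ds by simp [runGo]]
      rw [ih d (k+1) m hp']
      constructor
      · rintro (h | ⟨e, he, hec, hm⟩)
        · left; simp [List.count_cons]; push_cast; omega
        · right; exact ⟨e, List.mem_cons_of_mem _ he, hec, by simp [List.count_cons, Ne.symm hec]; exact hm⟩
      · rintro (h | ⟨e, he, hec, hm⟩)
        · left; simp [List.count_cons] at h; push_cast at h ⊢; omega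
        · right
          have he' : e ∈ ds := by rcases List.mem_cons.mp he with h | h; exact absurd h hec; exact h
          exact ⟨e, he', hec, by simp [List.count_cons, Ne.symm hec] at hm; exact hm⟩
    · have hnotmem : c ∉ d :: ds := not_mem_of_pairwise hp (by exact hdc)
      have hcount0 : List.count c (d :: ds) = 0 := List.count_eq_zero_of_not_mem hnotmem
      have hp' : (d :: ds).Pairwise (· ≤ ·) := List.pairwise_cons.mp hp |>.2
      rw [show runGo c k (d :: ds) = k :: runGo d 1 ds by simp [runGo, hdc]]
      rw [List.mem_cons, ih d 1 m hp']
      constructor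
      · rintro (h | h | ⟨e, he, hed, hm⟩)
        · left; rw [hcount0]; push_cast; omega
        · right; exact ⟨d, List.mem_cons_self, hdc, by simp [List.count_cons] at h ⊢; push_cast at h ⊢; omega⟩
        · right
          have hec : e ≠ c := by
            intro h; subst h
            exact hnotmem (List.mem_cons_of_mem _ he)
          exact ⟨e, List.mem_cons_of_mem _ he, hec, by simp [List.count_cons, Ne.symm hed]; exact hm⟩
      · rintro (h | ⟨e, he, hec, hm⟩)
        · left; rw [hcount0] at h; push_cast at h; omega
        · rcases List.mem_cons.mp he with h | h
          · subst h
            right; left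
            simp [List.count_cons] at hm; push_cast at hm; omega
          · by_cases hed : e = d
            · subst hed
              right; left
              simp [List.count_cons] at hm; push_cast at hm; omega
            · right; right
              exact ⟨e, h, hed, by simp [List.count_cons, Ne.symm hed] at hm; exact hm⟩

theorem mem_runLengths (s : List Char) (hs : s.Pairwise (· ≤ ·)) (m : Int) :
    m ∈ runLengths s ↔ ∃ e ∈ s, m = (s.count e : Int) := by
  match s with
  | [] => simp [runLengths]
  | c :: cs =>
    rw [show runLengths (c :: cs) = runGo c 1 cs from rfl, runGo_mem cs c 1 m hs]
    constructor
    · rintro (h | ⟨d, hd, hdc, hm⟩)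
      · exact ⟨c, List.mem_cons_self, by simp [List.count_cons]; push_cast; omega⟩
      · exact ⟨d, List.mem_cons_of_mem _ hd, by simp [List.count_cons, Ne.symm hdc]; exact hm⟩
    · rintro ⟨e, he, hm⟩
      by_cases hec : e = c
      · subst hec
        left; simp [List.count_cons] at hm; push_cast at hm ⊢; omega
      · right
        have he' : e ∈ cs := by rcases List.mem_cons.mp he with h | h; exact absurd h hec; exact h
        exact ⟨e, he', hec, by simp [List.count_cons, Ne.symm hec] at hm; exact hm⟩

-- adjacency flag: a count of 2 forces an adjacent equal pair in a sorted list
def hasEq : List Char → Bool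
  | [] => false
  | [_] => false
  | a :: b :: t => (a = b) || hasEq (b :: t)

theorem count_two_hasEq : ∀ (s : List Char), s.Pairwise (· ≤ ·) →
    ∀ e, 2 ≤ s.count e → hasEq s = true := by
  intro s
  induction s with
  | nil => intro _ e h; simp at h
  | cons a t ih =>
    intro hp e hcount
    match t, hp with
    | [], _ => simp [List.count_cons] at hcount; split at hcount <;> omega
    | b :: t', hp =>
      by_cases hae : a = e
      · subst hae
        have hat : a ∈ b :: t' := by
          rw [List.count_cons_self] at hcount
          exact List.count_pos_iff.mp (by omega)
        have hab : a ≤ b := (List.pairwise_cons.mp hp).1 b List.mem_cons_self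
        rcases List.mem_cons.mp hat with h | h
        · simp [hasEq, h]
        · have hba : b ≤ a := (List.pairwise_cons.mp (List.pairwise_cons.mp hp).2).1 a h
          have : a = b := le_antisymm hab hba
          simp [hasEq, this]
      · have : 2 ≤ List.count e (b :: t') := by
          simp [List.count_cons, hae] at hcount ⊢; omega
        have := ih (List.pairwise_cons.mp hp).2 e this
        simp [hasEq, this]

def hasDesc (s : List Char) : Bool := (s.zip s.tail).any (fun p => decide (p.2 < p.1))

theorem hasDesc_false_iff : ∀ s : List Char, hasDesc s = false ↔ s.IsChain (· ≤ ·) := by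
  intro s
  match s with
  | [] => simp [hasDesc]
  | [a] => simp [hasDesc]
  | a :: b :: t =>
    have ih := hasDesc_false_iff (b :: t)
    simp only [hasDesc, List.tail, List.zip_cons_cons, List.any_cons, Bool.or_eq_false_iff,
      List.isChain_cons_cons] at *
    constructor
    · rintro ⟨h1, h2⟩
      exact ⟨not_lt.mp (by simpa using h1), ih.mp h2⟩
    · rintro ⟨h1, h2⟩
      exact ⟨by simpa using not_lt.mpr h1, ih.mpr h2⟩

theorem valid2Go_desc : ∀ (cs : List Char) (prev : Char) (counts : List Int) (dup : Bool),
    hasDesc (prev :: cs) = true → valid2Go prev cs counts dup = false := by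
  intro cs
  induction cs with
  | nil => intro prev counts dup h; simp [hasDesc] at h
  | cons c cs' ih =>
    intro prev counts dup h
    simp only [hasDesc, List.tail, List.zip_cons_cons, List.any_cons, Bool.or_eq_true] at h
    by_cases hlt : c < prev
    · simp [valid2Go, hlt]
    · rcases h with h | h
      · simp at h; exact absurd h hlt
      · have := ih c (pvBump counts c) (if prev = c then true else dup) (by simpa [hasDesc] using h)
        simp only [valid2Go]
        rw [if_neg (by simpa using hlt)]
        exact this

theorem valid2Go_run : ∀ (cs : List Char) (prev : Char) (counts : List Int) (dup : Bool),
    (prev :: cs).IsChain (· ≤ ·) →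
    valid2Go prev cs counts dup =
      ((dup || hasEq (prev :: cs)) && decide ((2 : Int) ∈ List.foldl pvBump counts cs)) := by
  intro cs
  induction cs with
  | nil =>
    intro prev counts dup _
    simp only [List.foldl_nil, hasEq, Bool.or_false]
    rfl
  | cons c cs' ih =>
    intro prev counts dup hch
    have hle : prev ≤ c := (List.isChain_cons_cons.mp hch).1
    have hch' : (c :: cs').IsChain (· ≤ ·) := (List.isChain_cons_cons.mp hch).2
    simp only [valid2Go]
    rw [if_neg (by simpa using not_lt.mpr hle)]
    rw [ih c (pvBump counts c) (if prev = c then true else dup) hch']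
    simp only [List.foldl_cons]
    congr 1
    show ((if prev = c then true else dup) || hasEq (c :: cs')) = (dup || hasEq (prev :: c :: cs'))
    by_cases hpc : prev = c <;> simp [hasEq, hpc]

-- ===== VERDICT (by name: the statement is the Claim_ definition above) =====
theorem valid_2_spec : Claim_equal_valid_2 := by
  intro num _ hpre
  show valid_2 num = valid_2_alt num
  obtain ⟨s, hsdef⟩ : ∃ s, PySem.Int.toChars num = s := ⟨_, rfl⟩
  have hs : s = Nat.toDigits 10 num.toNat := by
    rw [← hsdef]; simp [PySem.Int.toChars, not_lt.mpr hpre]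
  have hdig : ∀ c ∈ s, ∃ d, d < 10 ∧ c = Nat.digitChar d := by
    rw [hs]
    exact toDigitsCore_digits (num.toNat + 1) num.toNat [] (by simp)
  have hne : s ≠ [] := by rw [hs]; exact toDigits_ne_nil _
  rcases List.exists_cons_of_ne_nil hne with ⟨c, cs, hcons⟩
  have hA : valid_2 num = valid2Go c cs (pvBump (List.replicate 10 0) c) false := by
    unfold valid_2
    rw [hsdef, hcons]
  by_cases hdesc : hasDesc s = true
  · have hB : valid_2_alt num = false := by
      unfold valid_2_alt
      rw [hsdef]
      simp only [show ((s.zip s.tail).any (fun p => decide (p.2 < p.1))) = hasDesc s from rfl, hdesc]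
      simp
    rw [hA, hB, valid2Go_desc cs c _ false (hcons ▸ hdesc)]
  · have hdesc' : hasDesc s = false := by simpa using hdesc
    have hch : s.IsChain (· ≤ ·) := (hasDesc_false_iff s).mp hdesc'
    have hpw : s.Pairwise (· ≤ ·) := List.isChain_iff_pairwise.mp hch
    have hB : valid_2_alt num = decide ((2 : Int) ∈ runLengths s) := by
      unfold valid_2_alt
      rw [hsdef]
      simp only [show ((s.zip s.tail).any (fun p => decide (p.2 < p.1))) = hasDesc s from rfl, hdesc']
      simp
    have hfold : List.foldl pvBump (pvBump (List.replicate 10 0) c) cs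
        = List.foldl pvBump (List.replicate 10 0) s := by rw [hcons]; rfl
    rw [hA, valid2Go_run cs c _ false (hcons ▸ hch), hB, Bool.false_or, hfold]
    rw [show hasEq (c :: cs) = hasEq s by rw [hcons]]
    by_cases hx : ∃ e ∈ s, s.count e = 2
    · have h2 : ((2 : Int) ∈ List.foldl pvBump (List.replicate 10 0) s) := (mem_foldl_bump s hdig).mpr hx
      rcases hx with ⟨e, he, hce⟩
      have heq : hasEq s = true := count_two_hasEq s hpw e (by omega)
      have hrl : (2 : Int) ∈ runLengths s :=
        (mem_runLengths s hpw 2).mpr ⟨e, he, by exact_mod_cast hce.symm⟩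
      rw [heq, Bool.true_and]
      exact decide_eq_decide.mpr ⟨fun _ => hrl, fun _ => h2⟩
    · have h2 : ¬ ((2 : Int) ∈ List.foldl pvBump (List.replicate 10 0) s) :=
        fun h => hx ((mem_foldl_bump s hdig).mp h)
      have hrl : ¬ ((2 : Int) ∈ runLengths s) := by
        intro h
        rcases (mem_runLengths s hpw 2).mp h with ⟨e, he, hm⟩
        exact hx ⟨e, he, by exact_mod_cast hm.symm⟩
      rw [decide_eq_false h2, decide_eq_false hrl, Bool.and_false]
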